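-- pv_equiv track=rewrite | github.com/yessgm/Codewars-Python | 7kyu/previous-multiple-of-three.py | prev_mult_of_three
-- ===== SOURCE A (Python) =====
-- def prev_mult_of_three(n):
--     num = str(n)
--
--     if int(num)>4:
--         while int(num)%3 != 0:
--             num = num[:len(num)-1]
--             if num == '':
--                 return None
--
--     return int(num) if int(num) >= 3 else None
-- ===== SOURCE B (Python) =====
-- def prev_mult_of_three(n):
--     num = int(str(n))
--     if num < 3:
--         return None
--     best = None
--     value = 0
--     r = 0
--     for c in str(num):
--         d = int(c)
--         value = value * 10 + d
--         r = (r + d) % 3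
--         if r == 0:
--             best = value
--     return best
-- ===== Notes on version B (the rewrite author's own statement) =====
-- stated objective: alternative
-- what changed: B replaces A's right-truncate-and-reparse loop by a single forward left-to-right scan that builds each prefix value arithmetically (value = value*10 + d), tracks the running digit sum mod 3, and records the last (longest) prefix whose sum is divisible by 3 -- no slicing and no re-parsing; B also drops A's 'int(num)>4' guard, correcting the quirky value at n=4 (see differs).
-- intended difference: Only at n=4: A's '>4' guard skips the truncation loop and returns 4, which is not a multiple of three; B finds no prefix divisible by three and returns None, the value the kata's digit-truncation rule intends. — e.g. on prev_mult_of_three(4): A returns some 4, B returns none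
import Mathlib
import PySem

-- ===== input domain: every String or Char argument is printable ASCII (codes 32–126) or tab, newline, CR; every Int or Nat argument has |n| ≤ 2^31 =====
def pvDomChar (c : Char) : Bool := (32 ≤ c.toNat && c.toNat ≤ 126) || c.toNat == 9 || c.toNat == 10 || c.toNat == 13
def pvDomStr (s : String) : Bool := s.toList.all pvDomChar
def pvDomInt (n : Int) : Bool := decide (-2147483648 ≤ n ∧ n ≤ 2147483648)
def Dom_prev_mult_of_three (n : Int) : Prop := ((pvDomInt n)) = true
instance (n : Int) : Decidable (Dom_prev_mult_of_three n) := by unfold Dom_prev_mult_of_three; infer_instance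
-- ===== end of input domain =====

-- B replaces A's right-truncation loop by one forward left-to-right scan that builds prefix
-- values arithmetically and records the last prefix whose digit sum is divisible by 3; at
-- n = 4 B returns the intended None where A's '>4' guard returns 4 (the difference D_ below).

-- ===== PORT A =====
-- int(s) for the strings A parses (str(n) and nonempty digit prefixes of it, on which
-- PySem.Int.ofChars? is always `some`; the getD default is unreachable).
def pvParse (s : List Char) : Int := (PySem.Int.ofChars? s).getD 0

-- length of num[:len(num)-1]; cited by pvLoopA's decreasing_by
theorem pvSliceLen (l : List Char) :
    (PySem.List.slice l none (some ((l.length : Int) - 1))).length = l.length - 1 := by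
  rcases l with _ | ⟨c, t⟩
  · rfl
  · have he : ((((c :: t).length : Nat) : Int) - 1) = ((t.length : Nat) : Int) := by
      push_cast [List.length_cons]
      omega
    rw [he, PySem.List.slice_to_natCast]
    simp

-- the `while int(num) % 3 != 0` loop of A; `none` = the `return None` inside it
def pvLoopA (num : List Char) : Option (List Char) :=
  if PySem.Int.mod (pvParse num) 3 ≠ 0 then
    let num' := PySem.List.slice num none (some ((num.length : Int) - 1))
    if h : num' = [] then none
    else pvLoopA num'
  else some num
termination_by num.length
decreasing_by
  rw [pvSliceLen]
  rcases num with _ | ⟨c, t⟩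
  · exact absurd (by rfl : (PySem.List.slice ([] : List Char) none (some (((0:Nat):Int) - 1))) = []) (by simpa using h)
  · simp

def prev_mult_of_three (n : Int) : Option Int :=
  let num := PySem.Int.toChars n
  match (if pvParse num > 4 then pvLoopA num else some num) with
  | none => none
  | some m => if pvParse m ≥ 3 then some (pvParse m) else none

-- ===== PORT B =====
-- int(c) for one digit character
def pvDigitInt (c : Char) : Int := (PySem.Int.ofChars? [c]).getD 0

-- the body of B's `for c in str(num)` loop; state = (best, value, r)
def pvStepB (st : Option Int × Int × Int) (c : Char) : Option Int × Int × Int :=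
  let d := pvDigitInt c
  let value := st.2.1 * 10 + d
  let r := PySem.Int.mod (st.2.2 + d) 3
  (if r = 0 then some value else st.1, value, r)

def prev_mult_of_three_alt (n : Int) : Option Int :=
  let num := pvParse (PySem.Int.toChars n)
  if num < 3 then none
  else ((PySem.Int.toChars num).foldl pvStepB (none, 0, 0)).1

-- ===== PRECONDITION & SPEC =====
-- Only at n = 4: A's '>4' guard skips the truncation loop and returns 4, which is not a
-- multiple of three; B finds no prefix divisible by three and returns None, the value the
-- kata's digit-truncation rule intends.
def D_prev_mult_of_three (n : Int) : Prop := n = 4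
instance (n : Int) : Decidable (D_prev_mult_of_three n) := by unfold D_prev_mult_of_three; infer_instance

def Spec_prev_mult_of_three (n : Int) (out : Option Int) : Prop :=
  ¬ D_prev_mult_of_three n → out = prev_mult_of_three_alt n
instance (n : Int) (out : Option Int) : Decidable (Spec_prev_mult_of_three n out) := by
  unfold Spec_prev_mult_of_three; infer_instance

def pvDiffWitness_prev_mult_of_three : Int := 4
def pvDiffWitnessOut_prev_mult_of_three : (Option Int) × (Option Int) := (some 4, none)

-- ===== CLAIM (what is proved, stated in full; the proofs are below) =====
def Claim_unchanged_prev_mult_of_three : Prop :=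
  ∀ (n : Int), Dom_prev_mult_of_three n → Spec_prev_mult_of_three n (prev_mult_of_three n)
def Claim_changed_prev_mult_of_three : Prop :=
  Dom_prev_mult_of_three (pvDiffWitness_prev_mult_of_three) ∧
  D_prev_mult_of_three (pvDiffWitness_prev_mult_of_three) ∧
  prev_mult_of_three (pvDiffWitness_prev_mult_of_three) = pvDiffWitnessOut_prev_mult_of_three.1 ∧
  prev_mult_of_three_alt (pvDiffWitness_prev_mult_of_three) = pvDiffWitnessOut_prev_mult_of_three.2 ∧
  pvDiffWitnessOut_prev_mult_of_three.1 ≠ pvDiffWitnessOut_prev_mult_of_three.2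
def Claim_exact_prev_mult_of_three : Prop :=
  ∀ (n : Int), Dom_prev_mult_of_three n → D_prev_mult_of_three n →
    prev_mult_of_three n ≠ prev_mult_of_three_alt n

-- ===== LEMMAS AND PROOFS =====

-- A faithful replica of the (private) digit scanner inside PySem.Int.ofChars?, so that its
-- behaviour can be reasoned about; pvOfChars_eq_my proves it agrees with the real one.
def myGo : List Char → Bool → Nat → Option Nat
  | [], afterDigit, acc => if afterDigit = true then some acc else none
  | c :: rest, afterDigit, acc =>
    if c.isDigit = true then myGo rest true (acc * 10 + (c.toNat - '0'.toNat))
    else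
      if c = '_' ∧ afterDigit = true then
        match rest with
        | d :: _tail => if d.isDigit = true then myGo rest false acc else none
        | [] => none
      else none

def myDigitsVal? (x : List Char) : Option Nat :=
  match x with
  | [] => none
  | cs => myGo cs false 0

def myOfChars? (s : List Char) : Option Int :=
  have cs := (List.dropWhile PySem.Int.isIntSpace (List.dropWhile PySem.Int.isIntSpace s).reverse).reverse
  match cs with
  | '-' :: ds =>
    Option.map (fun n => -n) do
      let a ← myDigitsVal? ds
      pure (↑a : Int)
  | '+' :: ds =>
    Option.map (fun n => n) do
      let a ← myDigitsVal? ds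
      pure (↑a : Int)
  | ds =>
    Option.map (fun n => n) do
      let a ← myDigitsVal? ds
      pure (↑a : Int)

theorem pvOfChars_eq_my (s : List Char) : PySem.Int.ofChars? s = myOfChars? s := by
  unfold PySem.Int.ofChars? myOfChars?
  generalize (List.dropWhile PySem.Int.isIntSpace (List.dropWhile PySem.Int.isIntSpace s).reverse).reverse = cs
  show PySem.Int.ofChars?.match_1 (fun _ => Option Int) cs _ _ _ =
       PySem.Int.ofChars?.match_1 (fun _ => Option Int) cs _ _ _
  congr 1
  all_goals {
    funext ds
    congr 1
    congr 1
    rcases ds with _ | ⟨d, t⟩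
    · rfl
    · conv_lhs => whnf
      conv_rhs => whnf
      rcases hb : d.isDigit with _ | _
      · conv_lhs => whnf
        conv_rhs => whnf
        rw [Subsingleton.elim (@instDecidableAnd (d = '_') (false = true) (instDecidableEqChar d '_') (instDecidableEqBool false true)) (isFalse (by simp))]
      · conv_lhs => whnf
        conv_rhs => whnf
        generalize (0 * 10 + (d.toNat - '0'.toNat) : Nat) = acc
        generalize true = b
        induction t generalizing b acc with
        | nil => cases b <;> rfl
        | cons c' t' IH =>
          conv_lhs => whnf
          conv_rhs => whnf
          rcases hc : c'.isDigit with _ | _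
          · conv_lhs => whnf
            conv_rhs => whnf
            by_cases hu : c' = '_' ∧ b = true
            · rw [Subsingleton.elim (@instDecidableAnd (c' = '_') (b = true) (instDecidableEqChar c' '_') (instDecidableEqBool b true)) (isTrue hu)]
              conv_lhs => whnf
              conv_rhs => whnf
              rcases t' with _ | ⟨e, r⟩
              · rfl
              · conv_lhs => whnf
                conv_rhs => whnf
                rcases he : e.isDigit with _ | _
                · rfl
                · conv_lhs => whnf
                  conv_rhs => whnf
                  exact IH _ _
            · rw [Subsingleton.elim (@instDecidableAnd (c' = '_') (b = true) (instDecidableEqChar c' '_') (instDecidableEqBool b true)) (isFalse hu)]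
          · conv_lhs => whnf
            conv_rhs => whnf
            exact IH _ _
  }

-- decimal digit list of a natural number, mirroring Nat.toDigitsCore's structure
def myGoDigits (n : Nat) : List Char :=
  if h : n / 10 = 0 then [(n % 10).digitChar] else myGoDigits (n / 10) ++ [(n % 10).digitChar]
termination_by n
decreasing_by omega

-- digit value fold (the value of a digit string)
def pvVal (ds : List Char) : Nat := ds.foldl (fun a c => a * 10 + (c.toNat - 48)) 0

theorem toDigitsCore_eq_my (f : Nat) : ∀ (n : Nat) (acc : List Char), n < f →
    Nat.toDigitsCore 10 f n acc = myGoDigits n ++ acc := by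
  induction f with
  | zero => intro n acc h; omega
  | succ f ih =>
    intro n acc h
    simp only [Nat.toDigitsCore]
    by_cases h0 : n / 10 = 0
    · rw [if_pos h0, myGoDigits, dif_pos h0]
      rfl
    · rw [if_neg h0, ih (n / 10) _ (by omega)]
      conv_rhs => rw [myGoDigits]
      rw [dif_neg h0]
      simp

theorem toChars_natCast (m : Nat) : PySem.Int.toChars (m : Int) = myGoDigits m := by
  unfold PySem.Int.toChars
  rw [if_neg (by omega)]
  show Nat.toDigits 10 (Int.toNat (m : Int)) = _
  rw [Int.toNat_natCast]
  unfold Nat.toDigits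
  rw [toDigitsCore_eq_my (m + 1) m [] (by omega)]
  simp

theorem digitChar_isDigit (k : Nat) (h : k < 10) : (Nat.digitChar k).isDigit = true := by
  interval_cases k <;> decide

theorem digitChar_val (k : Nat) (h : k < 10) : (Nat.digitChar k).toNat - 48 = k := by
  interval_cases k <;> decide

theorem myGoDigits_digits (n : Nat) : ∀ c ∈ myGoDigits n, c.isDigit = true := by
  induction n using Nat.strong_induction_on with
  | _ n ih =>
    intro c hc
    rw [myGoDigits] at hc
    by_cases h0 : n / 10 = 0
    · rw [dif_pos h0] at hc
      simp at hc
      subst hc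
      exact digitChar_isDigit _ (by omega)
    · rw [dif_neg h0] at hc
      rcases List.mem_append.mp hc with h | h
      · exact ih (n / 10) (by omega) c h
      · simp at h
        subst h
        exact digitChar_isDigit _ (by omega)

theorem myGoDigits_ne_nil (n : Nat) : myGoDigits n ≠ [] := by
  rw [myGoDigits]
  by_cases h0 : n / 10 = 0
  · rw [dif_pos h0]; simp
  · rw [dif_neg h0]; simp

theorem myGoDigits_dropLast_small (n : Nat) (h : n < 10) : (myGoDigits n).dropLast = [] := by
  unfold myGoDigits
  rw [dif_pos (by omega)]
  rfl

theorem myGoDigits_dropLast (n : Nat) (h : 10 ≤ n) :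
    (myGoDigits n).dropLast = myGoDigits (n / 10) := by
  conv_lhs => rw [myGoDigits]
  rw [dif_neg (by omega)]
  exact List.dropLast_concat

theorem myGoDigits_foldl (n : Nat) : ∀ acc : Nat,
    (myGoDigits n).foldl (fun a c => a * 10 + (c.toNat - 48)) acc
      = acc * 10 ^ (myGoDigits n).length + n := by
  induction n using Nat.strong_induction_on with
  | _ n ih =>
    intro acc
    by_cases h0 : n / 10 = 0
    · rw [myGoDigits, dif_pos h0]
      simp [digitChar_val (n % 10) (by omega)]
      omega
    · conv_lhs => rw [myGoDigits, dif_neg h0]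
      rw [List.foldl_append, ih (n / 10) (by omega) acc]
      rw [show (myGoDigits n).length = (myGoDigits (n / 10)).length + 1 by
        conv_lhs => rw [myGoDigits, dif_neg h0]
        simp]
      simp [digitChar_val (n % 10) (by omega)]
      ring_nf
      omega

theorem myGoDigits_val (n : Nat) : pvVal (myGoDigits n) = n := by
  have := myGoDigits_foldl n 0
  simpa [pvVal] using this

-- parse of a pure digit string
theorem notSpace_of_digit (c : Char) (h : c.isDigit = true) : PySem.Int.isIntSpace c = false := by
  unfold PySem.Int.isIntSpace
  have h1 : c ≠ ' ' := by rintro rfl; exact absurd h (by decide)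
  have h2 : c ≠ '\t' := by rintro rfl; exact absurd h (by decide)
  have h3 : c ≠ '\n' := by rintro rfl; exact absurd h (by decide)
  have h4 : c ≠ '\x0d' := by rintro rfl; exact absurd h (by decide)
  have h5 : c ≠ '\x0b' := by rintro rfl; exact absurd h (by decide)
  have h6 : c ≠ '\x0c' := by rintro rfl; exact absurd h (by decide)
  simp [h1, h2, h3, h4, h5, h6]

theorem dropWhile_nonspace (l : List Char) (h : ∀ c ∈ l, PySem.Int.isIntSpace c = false) :
    List.dropWhile PySem.Int.isIntSpace l = l := by
  rcases l with _ | ⟨c, t⟩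
  · rfl
  · rw [List.dropWhile_cons_of_neg]
    simp [h c (by simp)]

theorem strip_noop (l : List Char) (h : ∀ c ∈ l, PySem.Int.isIntSpace c = false) :
    (List.dropWhile PySem.Int.isIntSpace
      (List.dropWhile PySem.Int.isIntSpace l).reverse).reverse = l := by
  rw [dropWhile_nonspace l h,
    dropWhile_nonspace l.reverse (fun c hc => h c (List.mem_reverse.mp hc)),
    List.reverse_reverse]

theorem myGo_digits (ds : List Char) (h : ∀ c ∈ ds, c.isDigit = true) : ∀ acc : Nat,
    myGo ds true acc = some (ds.foldl (fun a c => a * 10 + (c.toNat - 48)) acc) := by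
  induction ds with
  | nil => intro acc; rfl
  | cons c t ih =>
    intro acc
    simp only [myGo]
    rw [if_pos (h c (by simp))]
    rw [ih (fun d hd => h d (by simp [hd])) _]
    rfl

theorem digitsVal_digits (ds : List Char) (hne : ds ≠ []) (h : ∀ c ∈ ds, c.isDigit = true) :
    myDigitsVal? ds = some (pvVal ds) := by
  rcases ds with _ | ⟨c, t⟩
  · exact absurd rfl hne
  · show myGo (c :: t) false 0 = _
    simp only [myGo]
    rw [if_pos (h c (by simp)), myGo_digits t (fun d hd => h d (by simp [hd]))]
    rfl

theorem ofChars_digits (ds : List Char) (hne : ds ≠ []) (h : ∀ c ∈ ds, c.isDigit = true) :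
    PySem.Int.ofChars? ds = some ((pvVal ds : Nat) : Int) := by
  rw [pvOfChars_eq_my]
  unfold myOfChars?
  rw [strip_noop ds (fun c hc => notSpace_of_digit c (h c hc))]
  rcases ds with _ | ⟨c, t⟩
  · exact absurd rfl hne
  · have hc' : c.isDigit = true := h c (by simp)
    have h1 : c ≠ '-' := by rintro rfl; exact absurd hc' (by decide)
    have h2 : c ≠ '+' := by rintro rfl; exact absurd hc' (by decide)
    conv_lhs => whnf
    split
    · next ds' heq =>
      rw [List.cons.injEq] at heq
      exact absurd heq.1 h1
    · next ds' heq =>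
      rw [List.cons.injEq] at heq
      exact absurd heq.1 h2
    · rw [digitsVal_digits (c :: t) (by simp) h]
      rfl

theorem ofChars_myGoDigits (m : Nat) :
    PySem.Int.ofChars? (myGoDigits m) = some ((m : Nat) : Int) := by
  rw [ofChars_digits _ (myGoDigits_ne_nil m) (myGoDigits_digits m), myGoDigits_val]

theorem toChars_neg (n : Int) (h : n < 0) :
    PySem.Int.toChars n = '-' :: myGoDigits n.natAbs := by
  unfold PySem.Int.toChars
  rw [if_pos h]
  unfold Nat.toDigits
  rw [toDigitsCore_eq_my (n.natAbs + 1) n.natAbs [] (by omega)]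
  simp

theorem roundtrip (n : Int) : PySem.Int.ofChars? (PySem.Int.toChars n) = some n := by
  by_cases h0 : 0 ≤ n
  · obtain ⟨m, rfl⟩ : ∃ m : Nat, n = (m : Int) := ⟨n.toNat, by omega⟩
    rw [toChars_natCast, ofChars_myGoDigits]
  · rw [toChars_neg n (by omega), pvOfChars_eq_my]
    unfold myOfChars?
    have hd := myGoDigits_digits n.natAbs
    have hall : ∀ c ∈ '-' :: myGoDigits n.natAbs, PySem.Int.isIntSpace c = false := by
      intro c hc
      rcases List.mem_cons.mp hc with rfl | hc
      · decide
      · exact notSpace_of_digit c (hd c hc)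
    rw [strip_noop _ hall]
    conv_lhs => whnf
    rw [digitsVal_digits _ (myGoDigits_ne_nil n.natAbs) hd, myGoDigits_val]
    show some (-(n.natAbs : Int)) = some n
    congr 1
    omega

theorem pvParse_toChars (n : Int) : pvParse (PySem.Int.toChars n) = n := by
  simp [pvParse, roundtrip]

theorem pvParse_myGoDigits (m : Nat) : pvParse (myGoDigits m) = (m : Int) := by
  simp [pvParse, ofChars_myGoDigits]

-- the shared arithmetic skeleton of both programs: drop the last digit until divisible by 3
def aArith (m : Nat) : Option Nat :=
  if m % 3 ≠ 0 then (if h : m / 10 = 0 then none else aArith (m / 10)) else some m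
termination_by m
decreasing_by omega

theorem aArith_inv (m : Nat) (h1 : 1 ≤ m) : ∀ k, aArith m = some k → k % 3 = 0 ∧ 1 ≤ k := by
  induction m using Nat.strong_induction_on with
  | _ m ih =>
    intro k hk
    rw [aArith] at hk
    by_cases h3 : m % 3 = 0
    · rw [if_neg (by omega)] at hk
      injection hk with hk'
      omega
    · rw [if_pos (by omega)] at hk
      by_cases h0 : m / 10 = 0
      · rw [dif_pos h0] at hk; cases hk
      · rw [dif_neg h0] at hk
        exact ih (m / 10) (by omega) (by omega) k hk

theorem slice_dropLast (l : List Char) :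
    PySem.List.slice l none (some ((l.length : Int) - 1)) = l.dropLast := by
  rcases l with _ | ⟨c, t⟩
  · rfl
  · have he : ((((c :: t).length : Nat) : Int) - 1) = ((t.length : Nat) : Int) := by
      push_cast [List.length_cons]
      omega
    rw [he, PySem.List.slice_to_natCast, List.dropLast_eq_take]
    simp

theorem pvLoopA_eq (m : Nat) (h1 : 1 ≤ m) :
    pvLoopA (myGoDigits m) = Option.map myGoDigits (aArith m) := by
  induction m using Nat.strong_induction_on with
  | _ m ih =>
    rw [pvLoopA, aArith, pvParse_myGoDigits]
    have hmc : PySem.Int.mod ((m : Nat) : Int) 3 = ((m % 3 : Nat) : Int) := by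
      exact_mod_cast PySem.Int.mod_natCast m 3
    rw [hmc]
    by_cases h3 : m % 3 = 0
    · rw [if_neg (by simp [h3]), if_neg (by omega)]
      rfl
    · rw [if_pos (by exact_mod_cast h3), if_pos (by omega)]
      rw [slice_dropLast]
      by_cases h0 : m / 10 = 0
      · rw [myGoDigits_dropLast_small m (by omega), dif_pos rfl, dif_pos h0]
        rfl
      · rw [myGoDigits_dropLast m (by omega), dif_neg (myGoDigits_ne_nil _), dif_neg h0]
        exact ih (m / 10) (by omega) (by omega)

theorem pvDigitInt_digit (c : Char) (h : c.isDigit = true) :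
    pvDigitInt c = ((c.toNat - 48 : Nat) : Int) := by
  unfold pvDigitInt
  rw [ofChars_digits [c] (by simp) (by simp [h])]
  simp [pvVal]

-- B's forward fold over the digits of m computes (longest divisible prefix, m, m % 3)
theorem foldB_eq (m : Nat) (h1 : 1 ≤ m) :
    (myGoDigits m).foldl pvStepB (none, 0, 0)
      = (Option.map (fun k => ((k : Nat) : Int)) (aArith m), ((m : Nat) : Int),
         ((m % 3 : Nat) : Int)) := by
  induction m using Nat.strong_induction_on with
  | _ m ih =>
    have hd9 : m % 10 < 10 := by omega
    have hdig : (Nat.digitChar (m % 10)).isDigit = true := digitChar_isDigit _ hd9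
    have hdval : pvDigitInt (Nat.digitChar (m % 10)) = ((m % 10 : Nat) : Int) := by
      rw [pvDigitInt_digit _ hdig, digitChar_val _ hd9]
    by_cases h0 : m / 10 = 0
    · -- single digit
      rw [myGoDigits, dif_pos h0]
      simp only [List.foldl_cons, List.foldl_nil, pvStepB, hdval]
      have hv : (0 : Int) * 10 + ((m % 10 : Nat) : Int) = ((m : Nat) : Int) := by
        push_cast; omega
      have hr : PySem.Int.mod ((0 : Int) + ((m % 10 : Nat) : Int)) 3
          = ((m % 3 : Nat) : Int) := by
        have : ((0 : Int) + ((m % 10 : Nat) : Int)) = ((m : Nat) : Int) := by push_cast; omega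
        rw [this]
        exact_mod_cast PySem.Int.mod_natCast m 3
      rw [hv, hr]
      by_cases h3 : m % 3 = 0
      · rw [if_pos (by exact_mod_cast h3), aArith, if_neg (by omega)]
        rfl
      · rw [if_neg (by exact_mod_cast fun h => h3 (by exact_mod_cast h)), aArith,
          if_pos (by omega), dif_pos h0]
        rfl
    · -- m ≥ 10: split off the last digit, use the IH on m / 10
      have h10 : 10 ≤ m := by omega
      conv_lhs => rw [myGoDigits, dif_neg h0]
      rw [List.foldl_append, ih (m / 10) (by omega) (by omega)]
      simp only [List.foldl_cons, List.foldl_nil, pvStepB, hdval]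
      have hv : ((m / 10 : Nat) : Int) * 10 + ((m % 10 : Nat) : Int) = ((m : Nat) : Int) := by
        push_cast; omega
      have hr : PySem.Int.mod (((m / 10 % 3 : Nat) : Int) + ((m % 10 : Nat) : Int)) 3
          = ((m % 3 : Nat) : Int) := by
        have he : (((m / 10 % 3 : Nat) : Int) + ((m % 10 : Nat) : Int))
            = (((m / 10 % 3 + m % 10 : Nat)) : Int) := by push_cast; ring
        rw [he]
        have h2 : PySem.Int.mod (((m / 10 % 3 + m % 10 : Nat)) : Int) 3
            = (((m / 10 % 3 + m % 10) % 3 : Nat) : Int) := by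
          exact_mod_cast PySem.Int.mod_natCast (m / 10 % 3 + m % 10) 3
        rw [h2]
        congr 1
        omega
      rw [hv, hr]
      conv_rhs => rw [aArith]
      by_cases h3 : m % 3 = 0
      · rw [if_pos (by exact_mod_cast h3), if_neg (by omega)]
        rfl
      · rw [if_neg (by exact_mod_cast fun h => h3 (by exact_mod_cast h)),
          if_pos (by omega), dif_neg h0]

theorem alt_eq (n : Int) (h : 3 ≤ n) :
    prev_mult_of_three_alt n = Option.map (fun k => (k : Int)) (aArith n.toNat) := by
  obtain ⟨m, rfl⟩ : ∃ m : Nat, n = (m : Int) := ⟨n.toNat, by omega⟩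
  simp only [prev_mult_of_three_alt]
  rw [pvParse_toChars, if_neg (by omega), toChars_natCast, foldB_eq m (by omega),
    Int.toNat_natCast]
  cases aArith m <;> rfl

theorem a_eq (n : Int) (h : 5 ≤ n) :
    prev_mult_of_three n = Option.map (fun k => (k : Int)) (aArith n.toNat) := by
  obtain ⟨m, rfl⟩ : ∃ m : Nat, n = (m : Int) := ⟨n.toNat, by omega⟩
  have hm1 : 1 ≤ m := by omega
  simp only [prev_mult_of_three]
  rw [pvParse_toChars, if_pos (by omega), toChars_natCast, pvLoopA_eq m hm1,
    Int.toNat_natCast]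
  cases haA : aArith m with
  | none => rfl
  | some k =>
    obtain ⟨hk3, hk1⟩ := aArith_inv m hm1 k haA
    show (if pvParse (myGoDigits k) ≥ 3 then some (pvParse (myGoDigits k)) else none) = _
    rw [pvParse_myGoDigits, if_pos (by omega)]
    rfl

theorem alt4 : prev_mult_of_three_alt 4 = none := by
  rw [alt_eq 4 (by norm_num), show Int.toNat 4 = 4 from rfl,
    show aArith 4 = none from by rw [aArith]; norm_num]
  rfl

-- ===== VERDICT (by name: the statement is the Claim_ definition above) =====
theorem prev_mult_of_three_spec : Claim_unchanged_prev_mult_of_three := by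
  intro n _ hD
  have hn4 : n ≠ 4 := hD
  by_cases h5 : 5 ≤ n
  · rw [a_eq n h5, alt_eq n (by omega)]
  · by_cases h3 : 3 ≤ n
    · have hn3 : n = 3 := by omega
      subst hn3
      rw [alt_eq 3 (by norm_num), show Int.toNat 3 = 3 from rfl,
        show aArith 3 = some 3 by rw [aArith]; norm_num]
      decide
    · -- n < 3: A's guard is false and int(num) < 3, B returns on num < 3
      show (match (if pvParse (PySem.Int.toChars n) > 4 then pvLoopA (PySem.Int.toChars n)
                   else some (PySem.Int.toChars n)) with
            | none => none
            | some m => if pvParse m ≥ 3 then some (pvParse m) else none) = _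
      rw [pvParse_toChars, if_neg (by omega)]
      show (if pvParse (PySem.Int.toChars n) ≥ 3 then some (pvParse (PySem.Int.toChars n)) else none) = _
      rw [pvParse_toChars, if_neg (by omega)]
      show _ = (if pvParse (PySem.Int.toChars n) < 3 then none else _)
      rw [pvParse_toChars, if_pos (by omega)]

theorem prev_mult_of_three_changed : Claim_changed_prev_mult_of_three := by
  unfold Claim_changed_prev_mult_of_three
  refine ⟨by decide, by decide, by decide, alt4, by decide⟩

theorem prev_mult_of_three_tight : Claim_exact_prev_mult_of_three := by
  intro n _ hD
  unfold D_prev_mult_of_three at hD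
  subst hD
  rw [alt4]
  decide
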